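-- pv_equiv track=rewrite | github.com/Rotciv004/Algebra | Boar Victor.py | is_reduced_echelon
-- ===== SOURCE A (Python) =====
-- def is_reduced_echelon(matrix):
--     leading_one_cols = set()
--
--     for i in range(0,len(matrix)):
--         leading_one_found = False
--
--         for j in range(0,len(matrix[i])):
--             if matrix[i][j] == 1:
--                 if leading_one_found:
--                     return False
--
--                 if j in leading_one_cols:
--                     return False
--
--                 leading_one_found = True
--                 leading_one_cols.add(j)
--
--     return True
-- ===== SOURCE B (Python) =====
-- def is_reduced_echelon(matrix):
--     rows = []
--     cols = []
--     for i, row in enumerate(matrix):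
--         for j, x in enumerate(row):
--             if x == 1:
--                 rows.append(i)
--                 cols.append(j)
--     return len(set(rows)) == len(rows) and len(set(cols)) == len(cols)
-- ===== Notes on version B (the rewrite author's own statement) =====
-- stated objective: alternative
-- what changed: Replaces A's incremental column-set with per-row flag and early returns by a gather-then-verify pass: collect the (row, col) positions of all 1-entries, then decide by comparing set cardinalities of the row list and the column list.
import Mathlib
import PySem

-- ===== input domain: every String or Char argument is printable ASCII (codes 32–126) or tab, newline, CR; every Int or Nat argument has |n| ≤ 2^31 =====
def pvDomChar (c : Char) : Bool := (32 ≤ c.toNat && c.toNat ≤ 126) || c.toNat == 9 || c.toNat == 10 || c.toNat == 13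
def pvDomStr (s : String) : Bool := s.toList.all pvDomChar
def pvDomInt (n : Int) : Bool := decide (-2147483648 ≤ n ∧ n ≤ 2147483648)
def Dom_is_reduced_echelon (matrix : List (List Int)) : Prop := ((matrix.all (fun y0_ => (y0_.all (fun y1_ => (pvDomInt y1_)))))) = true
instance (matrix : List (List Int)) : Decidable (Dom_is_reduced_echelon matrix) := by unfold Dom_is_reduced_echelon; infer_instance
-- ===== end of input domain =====

-- B gathers all 1-positions in one pass and checks row/column distinctness by set cardinalities,
-- instead of A's incremental column set with a per-row flag and early returns (same cost; objective: alternative).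

-- ===== PORT A =====
-- inner loop over one row (index j, flag `leading_one_found`, the column set); none = early `return False`
def isRedRowA : List Int → Int → Bool → PySem.Set Int → Option (PySem.Set Int)
  | [], _, _, cols => some cols
  | x :: rest, j, found, cols =>
    if x == 1 then
      if found then none
      else if PySem.Set.contains cols j then none
      else isRedRowA rest (j + 1) true (PySem.Set.add cols j)
    else isRedRowA rest (j + 1) found cols

-- outer loop over the rows
def isRedRowsA : List (List Int) → PySem.Set Int → Bool
  | [], _ => true
  | r :: rs, cols =>
    match isRedRowA r 0 false cols with
    | none => false
    | some cols' => isRedRowsA rs cols'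

def is_reduced_echelon (matrix : List (List Int)) : Bool :=
  isRedRowsA matrix PySem.Set.empty

-- ===== PORT B =====
def is_reduced_echelon_alt (matrix : List (List Int)) : Bool :=
  let cells := (PySem.List.enumerate matrix 0).flatMap (fun p =>
    (PySem.List.enumerate p.2 0).filterMap (fun q =>
      if q.2 == 1 then some (p.1, q.1) else none))
  let rows := cells.map (·.1)
  let cols := cells.map (·.2)
  ((PySem.Set.ofList rows).length == rows.length) && ((PySem.Set.ofList cols).length == cols.length)

-- ===== PRECONDITION & SPEC =====
def Spec_is_reduced_echelon (matrix : List (List Int)) (out : Bool) : Prop := out = is_reduced_echelon_alt matrix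
instance (matrix : List (List Int)) (out : Bool) : Decidable (Spec_is_reduced_echelon matrix out) := by unfold Spec_is_reduced_echelon; infer_instance

-- ===== CLAIM (what is proved, stated in full; the proofs are below) =====
def Claim_equal_is_reduced_echelon : Prop := ∀ (matrix : List (List Int)), Dom_is_reduced_echelon matrix → Spec_is_reduced_echelon matrix (is_reduced_echelon matrix)

-- ===== LEMMAS AND PROOFS =====

-- the column indices (from start j) of the 1-entries of a row
def onesF (j : Int) : List Int → List Int
  | [] => []
  | x :: xs => if x == 1 then j :: onesF (j + 1) xs else onesF (j + 1) xs

-- the inner loop, started with the flag set: succeeds iff the rest has no 1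
theorem isRedRowA_true (r : List Int) (j : Int) (cols : PySem.Set Int) :
    isRedRowA r j true cols = if onesF j r = [] then some cols else none := by
  induction r generalizing j with
  | nil => simp [isRedRowA, onesF]
  | cons x xs ih => by_cases hx : x = 1 <;> simp [isRedRowA, onesF, hx, ih]

-- the inner loop, as called by the outer loop
theorem isRedRowA_false (r : List Int) (j : Int) (cols : PySem.Set Int) :
    isRedRowA r j false cols =
      match onesF j r with
      | [] => some cols
      | k :: ks =>
        if PySem.Set.contains cols k then none
        else if ks = [] then some (PySem.Set.add cols k) else none := by
  induction r generalizing j with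
  | nil => simp [isRedRowA, onesF]
  | cons x xs ih =>
    by_cases hx : x = 1
    · simp only [isRedRowA, onesF, hx, beq_self_eq_true, if_true]
      by_cases hm : j ∈ cols
      · simp [hm]
      · simp [hm, isRedRowA_true]
    · simp [isRedRowA, onesF, hx, ih]

-- characterisation of A's outer loop
theorem isRedRowsA_iff (rs : List (List Int)) (cols : PySem.Set Int) (hnd : cols.Nodup) :
    isRedRowsA rs cols = true ↔
      (∀ r ∈ rs, (onesF 0 r).length ≤ 1) ∧ (cols ++ rs.flatMap (onesF 0)).Nodup := by
  induction rs generalizing cols with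
  | nil => simpa [isRedRowsA] using hnd
  | cons r rs ih =>
    simp only [isRedRowsA]
    rw [isRedRowA_false]
    cases h1 : onesF 0 r with
    | nil =>
      show isRedRowsA rs cols = true ↔ _
      rw [ih cols hnd]
      constructor
      · rintro ⟨h2, h3⟩
        refine ⟨?_, ?_⟩
        · intro x hx
          rcases List.mem_cons.mp hx with rfl | hx'
          · simp [h1]
          · exact h2 x hx'
        · simpa [List.flatMap_cons, h1] using h3
      · rintro ⟨h2, h3⟩
        refine ⟨fun x hx => h2 x (List.mem_cons_of_mem _ hx), ?_⟩
        simpa [List.flatMap_cons, h1] using h3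
    | cons k ks =>
      show (match (if PySem.Set.contains cols k = true then none
                   else if ks = [] then some (PySem.Set.add cols k) else none) with
            | none => false
            | some cols' => isRedRowsA rs cols') = true ↔ _
      by_cases hc : PySem.Set.contains cols k = true
      · rw [if_pos hc]
        have hk : k ∈ cols := (PySem.Set.contains_iff _ _).mp hc
        refine iff_of_false (by simp) ?_
        rintro ⟨-, h3⟩
        rw [List.nodup_append] at h3
        exact h3.2.2 k hk k (by simp [List.flatMap_cons, h1]) rfl
      · rw [if_neg hc]
        have hk : k ∉ cols := fun ha => hc ((PySem.Set.contains_iff _ _).mpr ha)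
        cases ks with
        | nil =>
          rw [if_pos rfl]
          show isRedRowsA rs (PySem.Set.add cols k) = true ↔ _
          have hadd : PySem.Set.add cols k = cols ++ [k] := by
            simp only [PySem.Set.add, if_neg hc]
          have hnd' : (PySem.Set.add cols k).Nodup := by
            rw [hadd, List.nodup_append]
            refine ⟨hnd, List.nodup_singleton k, ?_⟩
            intro a ha b hb
            simp only [List.mem_singleton] at hb
            subst hb
            exact fun h => hk (h ▸ ha)
          rw [ih _ hnd', hadd]
          constructor
          · rintro ⟨h2, h3⟩
            refine ⟨?_, ?_⟩
            · intro x hx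
              rcases List.mem_cons.mp hx with rfl | hx'
              · simp [h1]
              · exact h2 x hx'
            · simpa [List.flatMap_cons, h1, List.append_assoc] using h3
          · rintro ⟨h2, h3⟩
            refine ⟨fun x hx => h2 x (List.mem_cons_of_mem _ hx), ?_⟩
            simpa [List.flatMap_cons, h1, List.append_assoc] using h3
        | cons b bs =>
          rw [if_neg (by simp)]
          refine iff_of_false (by simp) ?_
          rintro ⟨h2, -⟩
          have hr := h2 r (by simp)
          rw [h1] at hr
          simp at hr

-- ofList has the length of the list iff the list has no duplicates
theorem ofList_length_eq_iff_nodup (l : List Int) :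
    ((PySem.Set.ofList l).length = l.length) ↔ l.Nodup := by
  have hperm : (PySem.Set.ofList l).Perm l.dedup := by
    refine (List.perm_ext_iff_of_nodup (PySem.Set.nodup_ofList l) l.nodup_dedup).mpr ?_
    intro x; simp [PySem.Set.mem_ofList, List.mem_dedup]
  rw [hperm.length_eq]
  constructor
  · intro h
    have hd := List.Sublist.eq_of_length l.dedup_sublist h
    exact hd ▸ l.nodup_dedup
  · intro h; rw [List.dedup_eq_self.mpr h]

-- B's per-row cell list, projected
theorem row_cells_snd (i : Int) (r : List Int) (j : Int) :
    ((PySem.List.enumerate r j).filterMap (fun q =>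
      if q.2 == 1 then some (i, q.1) else none)).map (·.2) = onesF j r := by
  induction r generalizing j with
  | nil => simp [PySem.List.enumerate_nil, onesF]
  | cons x xs ih =>
    have ih' := fun j => (by simpa using ih j :)
    by_cases hx : x = 1 <;>
      simp [PySem.List.enumerate_cons, onesF, hx, ih']

theorem row_cells_fst (i : Int) (r : List Int) (j : Int) :
    ((PySem.List.enumerate r j).filterMap (fun q =>
      if q.2 == 1 then some (i, q.1) else none)).map (·.1) =
      List.replicate (onesF j r).length i := by
  induction r generalizing j with
  | nil => simp [PySem.List.enumerate_nil, onesF]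
  | cons x xs ih =>
    have ih' := fun j => (by simpa using ih j :)
    by_cases hx : x = 1 <;>
      simp [PySem.List.enumerate_cons, onesF, hx, ih', List.replicate_succ]

-- B's full column list is the concatenation of the rows' 1-columns
theorem cells_snd (m : List (List Int)) (s : Int) :
    (((PySem.List.enumerate m s).flatMap (fun p =>
      (PySem.List.enumerate p.2 0).filterMap (fun q =>
        if q.2 == 1 then some (p.1, q.1) else none))).map (·.2)) = m.flatMap (onesF 0) := by
  induction m generalizing s with
  | nil => simp [PySem.List.enumerate_nil]
  | cons r rs ih =>
    simp only [PySem.List.enumerate_cons, List.flatMap_cons, List.map_append]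
    rw [row_cells_snd, ih]

def rowsAux (s : Int) : List (List Int) → List Int
  | [] => []
  | r :: m => List.replicate (onesF 0 r).length s ++ rowsAux (s + 1) m

theorem cells_fst (m : List (List Int)) (s : Int) :
    (((PySem.List.enumerate m s).flatMap (fun p =>
      (PySem.List.enumerate p.2 0).filterMap (fun q =>
        if q.2 == 1 then some (p.1, q.1) else none))).map (·.1)) = rowsAux s m := by
  induction m generalizing s with
  | nil => simp [PySem.List.enumerate_nil, rowsAux]
  | cons r rs ih =>
    simp only [PySem.List.enumerate_cons, List.flatMap_cons, List.map_append, rowsAux]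
    rw [row_cells_fst, ih]

theorem mem_rowsAux_le {s x : Int} {m : List (List Int)} (h : x ∈ rowsAux s m) : s ≤ x := by
  induction m generalizing s with
  | nil => simp [rowsAux] at h
  | cons r rs ih =>
    simp only [rowsAux, List.mem_append] at h
    rcases h with h | h
    · rw [List.eq_of_mem_replicate h]
    · have := ih h; omega

theorem nodup_rowsAux_iff (m : List (List Int)) (s : Int) :
    (rowsAux s m).Nodup ↔ ∀ r ∈ m, (onesF 0 r).length ≤ 1 := by
  induction m generalizing s with
  | nil => simp [rowsAux]
  | cons r rs ih =>
    simp only [rowsAux]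
    rw [List.nodup_append]
    constructor
    · rintro ⟨h1, h2, -⟩
      intro x hx
      rcases List.mem_cons.mp hx with rfl | hx'
      · by_contra hlen
        have h2le : 2 ≤ (onesF 0 x).length := by omega
        rw [List.nodup_replicate] at h1
        omega
      · exact (ih (s + 1)).mp h2 x hx'
    · intro h
      refine ⟨?_, (ih (s + 1)).mpr (fun x hx => h x (List.mem_cons_of_mem _ hx)), ?_⟩
      · rw [List.nodup_replicate]
        have := h r (by simp); omega
      · intro a ha b hb
        have ha' : a = s := List.eq_of_mem_replicate ha
        have hb' : s + 1 ≤ b := mem_rowsAux_le hb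
        omega

-- characterisation of B
theorem alt_iff (m : List (List Int)) :
    is_reduced_echelon_alt m = true ↔
      (∀ r ∈ m, (onesF 0 r).length ≤ 1) ∧ (m.flatMap (onesF 0)).Nodup := by
  simp only [is_reduced_echelon_alt]
  rw [cells_fst, cells_snd]
  simp only [Bool.and_eq_true, beq_iff_eq]
  rw [ofList_length_eq_iff_nodup, ofList_length_eq_iff_nodup, nodup_rowsAux_iff]

-- ===== VERDICT (by name: the statement is the Claim_ definition above) =====
theorem is_reduced_echelon_spec : Claim_equal_is_reduced_echelon := by
  intro matrix _
  unfold Spec_is_reduced_echelon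
  have hA := isRedRowsA_iff matrix PySem.Set.empty (by simp [PySem.Set.empty])
  have hB := alt_iff matrix
  rw [show (PySem.Set.empty : PySem.Set Int) ++ matrix.flatMap (onesF 0)
        = matrix.flatMap (onesF 0) from List.nil_append _] at hA
  show is_reduced_echelon matrix = is_reduced_echelon_alt matrix
  rw [Bool.eq_iff_iff]
  unfold is_reduced_echelon
  rw [hA, hB]
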